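-- pv_equiv track=rewrite | github.com/mshafqats/HackerEarth | Math/Combinatorics/Basics of Combinatorics/Killjee and base X.py | solve
-- ===== SOURCE A (Python) =====
-- def solve (k, n):
--     # Write your code here
--     pre=0
--     ret=0
--     num=1
--     val=1
--     while(1):
--         num=num*k
--         if(num>n):
--             ret += (n-pre+1)*val
--             break
--         ret+=(num-pre)*val
--         pre=num
--         val+=1
--     return ret
-- ===== SOURCE B (Python) =====
-- def solve(k, n):
--     # Column-wise count: every 0..n contributes 1 digit (n+1 total);
--     # each power p = k, k^2, ... with p <= n adds one extra digit to the n-p+1 numbers >= p.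
--     total = n + 1
--     p = k
--     while p <= n:
--         total += n - p + 1
--         p *= k
--     return total
-- ===== Notes on version B (the rewrite author's own statement) =====
-- stated objective: simpler
-- what changed: B transposes A's row-wise sum of (segment width)x(digit length) into a column-wise count: start from n+1 (one digit each) and add n-p+1 for every power p=k,k^2,...<=n, eliminating the pre/val state and all products.
import Mathlib
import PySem

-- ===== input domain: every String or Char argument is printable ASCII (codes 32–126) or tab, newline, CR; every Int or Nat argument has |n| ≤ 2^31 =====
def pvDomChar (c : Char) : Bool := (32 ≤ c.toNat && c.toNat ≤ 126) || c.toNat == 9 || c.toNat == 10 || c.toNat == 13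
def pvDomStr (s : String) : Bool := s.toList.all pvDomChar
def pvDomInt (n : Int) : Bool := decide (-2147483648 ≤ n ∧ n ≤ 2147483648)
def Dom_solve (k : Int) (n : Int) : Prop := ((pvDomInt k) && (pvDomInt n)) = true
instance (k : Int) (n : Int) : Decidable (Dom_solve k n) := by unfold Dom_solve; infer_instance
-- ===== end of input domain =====

-- B replaces A's per-range (width × digit-length) accumulation by a column-wise count
-- (n+1 plus n-p+1 for each power p ≤ n); objective: simpler.

-- ===== PORT A =====
-- fuel-bounded transliteration of A's 'while(1)' loop; state (pre, ret, num, val) as in A.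
-- Fuel exhaustion (only reached where the Python loop diverges) returns the
-- arbitrary sentinel 0.
def solveLoopA (k n : Int) : Nat → Int → Int → Int → Int → Int
  | 0, _, _, _, _ => 0
  | f + 1, pre, ret, num, val =>
    let num' := num * k
    if num' > n then ret + (n - pre + 1) * val
    else solveLoopA k n f num' (ret + (num' - pre) * val) num' (val + 1)

def solve (k : Int) (n : Int) : Int := solveLoopA k n (n.toNat + 2) 0 0 1 1

-- ===== PORT B =====
-- fuel-bounded transliteration of Source B's 'while p <= n' loop; state (p, total).
-- Same arbitrary sentinel 0 on fuel exhaustion (only reached where the Python loop diverges).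
def solveLoopB (k n : Int) : Nat → Int → Int → Int
  | 0, _, _ => 0
  | f + 1, p, total =>
    if p ≤ n then solveLoopB k n f (p * k) (total + (n - p + 1)) else total

def solve_alt (k : Int) (n : Int) : Int := solveLoopB k n (n.toNat + 2) k (n + 1)

-- ===== PRECONDITION & SPEC =====
-- no Pre_: the two ports agree on every input (on inputs where the Python loops
-- diverge, both fuel-bounded ports exhaust the same fuel and return the same sentinel)
def Spec_solve (k : Int) (n : Int) (out : Int) : Prop := out = solve_alt k n
instance (k : Int) (n : Int) (out : Int) : Decidable (Spec_solve k n out) := by unfold Spec_solve; infer_instance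

-- ===== CLAIM (what is proved, stated in full; the proofs are below) =====
def Claim_equal_solve : Prop := ∀ (k : Int) (n : Int), Dom_solve k n → Spec_solve k n (solve k n)

-- ===== LEMMAS AND PROOFS =====

-- Bisimulation with the Abel-summation invariant: A's state (pre, ret, num, val)
-- corresponds to B's state (p, total) with p = num*k and total = ret + (n-pre+1)*val.
theorem solveLoop_eq (k n : Int) : ∀ (f : Nat) (pre ret num val : Int),
    solveLoopA k n f pre ret num val
      = solveLoopB k n f (num * k) (ret + (n - pre + 1) * val) := by
  intro f
  induction f with
  | zero => intro pre ret num val; rfl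
  | succ f ih =>
    intro pre ret num val
    simp only [solveLoopA, solveLoopB]
    by_cases h : num * k > n
    · rw [if_pos h, if_neg (not_le.mpr h)]
    · rw [if_neg h, if_pos (not_lt.mp h), ih]
      congr 1
      ring

-- ===== VERDICT (by name: the statement is the Claim_ definition above) =====
theorem solve_spec : Claim_equal_solve := by
  intro k n _
  unfold Spec_solve solve solve_alt
  rw [solveLoop_eq]
  norm_num
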